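-- pv_equiv track=rewrite | github.com/ShawnYi5/logic_service | modget.py | str_cmp_unsuffix
-- ===== SOURCE A (Python) =====
-- def str_cmp_unsuffix(str1, str2):
--     u'''
--     :param str1:文件名
--     :param str2:文件名
--     :return:相同：0   不同：-1
--     '''
--     if not all(['.' in str1, '.' in str2]):
--         return -1
--
--     str1_unsuffix = '{}.{}'.format(str1.split('.')[0], str1.split('.')[1])
--     str2_unsuffix = '{}.{}'.format(str2.split('.')[0], str2.split('.')[1])
--
--     if len(str1_unsuffix) != len(str2_unsuffix):
--         return -1
--     for i in range(len(str1_unsuffix)):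
--         if (str1_unsuffix[i] == '-' or str1_unsuffix[i] == '_') and (
--                 str2_unsuffix[i] == '-' or str2_unsuffix[i] == '_'):
--             continue
--         if str1_unsuffix[i] != str2_unsuffix[i]:
--             return -1
--     return 0
-- ===== SOURCE B (Python) =====
-- def str_cmp_unsuffix(str1, str2):
--     if not all(['.' in str1, '.' in str2]):
--         return -1
--     str1_unsuffix = '{}.{}'.format(str1.split('.')[0], str1.split('.')[1])
--     str2_unsuffix = '{}.{}'.format(str2.split('.')[0], str2.split('.')[1])
--     def norm(s):
--         return ''.join('_' if c == '-' else c for c in s)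
--     return 0 if norm(str1_unsuffix) == norm(str2_unsuffix) else -1
-- ===== Notes on version B (the rewrite author's own statement) =====
-- stated objective: simpler
-- what changed: Replaces the explicit length check and per-index continue/compare loop with a single canonicalization pass (map '-' to '_') followed by one string equality.
import Mathlib
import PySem

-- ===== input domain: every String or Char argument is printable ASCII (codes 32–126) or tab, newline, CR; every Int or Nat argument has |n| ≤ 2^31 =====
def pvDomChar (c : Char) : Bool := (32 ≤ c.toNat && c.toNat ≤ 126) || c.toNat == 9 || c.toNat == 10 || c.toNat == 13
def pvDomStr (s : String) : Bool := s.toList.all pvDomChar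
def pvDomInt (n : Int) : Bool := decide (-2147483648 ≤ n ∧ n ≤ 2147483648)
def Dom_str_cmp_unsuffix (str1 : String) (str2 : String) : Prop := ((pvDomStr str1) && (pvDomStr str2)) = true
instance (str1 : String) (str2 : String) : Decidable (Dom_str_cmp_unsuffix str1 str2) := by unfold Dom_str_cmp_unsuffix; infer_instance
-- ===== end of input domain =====

-- B replaces A's length check and per-index loop with a '-'→'_' canonicalization pass and one equality (same cost, simpler).


-- ===== PORT A =====
-- Python's 'for i in range(len(u1)): … continue … return -1 … / return 0' as index recursion.
def pvLoopA (u1 u2 : List Char) (i : Nat) : Int :=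
  if i < u1.length then
    let a := u1.getD i ' '
    let b := u2.getD i ' '
    if (a = '-' ∨ a = '_') ∧ (b = '-' ∨ b = '_') then pvLoopA u1 u2 (i + 1)
    else if a ≠ b then -1
    else pvLoopA u1 u2 (i + 1)
  else 0
termination_by u1.length - i

def str_cmp_unsuffix (str1 : String) (str2 : String) : Int :=
  if !(PySem.Str.isIn "." str1 && PySem.Str.isIn "." str2) then -1
  else
    -- '{}.{}'.format(s.split('.')[0], s.split('.')[1]); the guard puts indices 0,1 in range
    let s1 := PySem.Chars.splitOn str1.toList ['.']
    let s2 := PySem.Chars.splitOn str2.toList ['.']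
    let u1 := PySem.List.pyGetD s1 0 [] ++ ['.'] ++ PySem.List.pyGetD s1 1 []
    let u2 := PySem.List.pyGetD s2 0 [] ++ ['.'] ++ PySem.List.pyGetD s2 1 []
    if u1.length ≠ u2.length then -1
    else pvLoopA u1 u2 0

-- ===== PORT B =====
-- ''.join('_' if c == '-' else c for c in s)
def pvNorm (c : Char) : Char := if c = '-' then '_' else c

def str_cmp_unsuffix_alt (str1 : String) (str2 : String) : Int :=
  if !(PySem.Str.isIn "." str1 && PySem.Str.isIn "." str2) then -1
  else
    let s1 := PySem.Chars.splitOn str1.toList ['.']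
    let s2 := PySem.Chars.splitOn str2.toList ['.']
    let u1 := PySem.List.pyGetD s1 0 [] ++ ['.'] ++ PySem.List.pyGetD s1 1 []
    let u2 := PySem.List.pyGetD s2 0 [] ++ ['.'] ++ PySem.List.pyGetD s2 1 []
    if u1.map pvNorm = u2.map pvNorm then 0 else -1

-- ===== PRECONDITION & SPEC =====
def Spec_str_cmp_unsuffix (str1 : String) (str2 : String) (out : Int) : Prop := out = str_cmp_unsuffix_alt str1 str2
instance (str1 : String) (str2 : String) (out : Int) : Decidable (Spec_str_cmp_unsuffix str1 str2 out) := by unfold Spec_str_cmp_unsuffix; infer_instance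

-- ===== CLAIM (what is proved, stated in full; the proofs are below) =====
def Claim_equal_str_cmp_unsuffix : Prop := ∀ (str1 : String) (str2 : String), Dom_str_cmp_unsuffix str1 str2 → Spec_str_cmp_unsuffix str1 str2 (str_cmp_unsuffix str1 str2)

-- ===== LEMMAS AND PROOFS =====

-- A's per-index pass condition is exactly equality of the canonicalized characters.
theorem pvNorm_eq_iff (a b : Char) :
    (pvNorm a = pvNorm b) ↔ ((a = '-' ∨ a = '_') ∧ (b = '-' ∨ b = '_')) ∨ a = b := by
  unfold pvNorm
  split_ifs with ha hb hb <;> simp_all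
  tauto

theorem pvLoopA_eq (u1 u2 : List Char) (h : u1.length = u2.length) (i : Nat) :
    pvLoopA u1 u2 i =
      if (u1.drop i).map pvNorm = (u2.drop i).map pvNorm then 0 else -1 := by
  by_cases hi : i < u1.length
  · rw [pvLoopA]
    have hi2 : i < u2.length := h ▸ hi
    have hd1 : u1.drop i = u1[i] :: u1.drop (i + 1) := List.drop_eq_getElem_cons hi
    have hd2 : u2.drop i = u2[i] :: u2.drop (i + 1) := List.drop_eq_getElem_cons hi2
    have ih := pvLoopA_eq u1 u2 h (i + 1)
    have hg1 : u1.getD i ' ' = u1[i] := List.getD_eq_getElem u1 ' ' hi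
    have hg2 : u2.getD i ' ' = u2[i] := List.getD_eq_getElem u2 ' ' hi2
    simp only [hi, if_pos, hg1, hg2, hd1, hd2, List.map_cons, List.cons_eq_cons, ih]
    by_cases hc : (u1[i] = '-' ∨ u1[i] = '_') ∧ (u2[i] = '-' ∨ u2[i] = '_')
    · have : pvNorm u1[i] = pvNorm u2[i] := (pvNorm_eq_iff _ _).mpr (Or.inl hc)
      simp [hc, this]
    · simp only [hc, if_false]
      by_cases he : u1[i] = u2[i]
      · have : pvNorm u1[i] = pvNorm u2[i] := (pvNorm_eq_iff _ _).mpr (Or.inr he)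
        simp [he, this]
      · have : ¬ pvNorm u1[i] = pvNorm u2[i] := by
          intro hn
          rcases (pvNorm_eq_iff _ _).mp hn with hcc | hee
          · exact hc hcc
          · exact he hee
        simp [he, this]
  · have h1 : u1.drop i = [] := List.drop_eq_nil_of_le (by omega)
    have h2 : u2.drop i = [] := List.drop_eq_nil_of_le (by omega)
    rw [pvLoopA]
    simp [hi, h1, h2]
termination_by u1.length - i

-- ===== VERDICT (by name: the statement is the Claim_ definition above) =====
theorem str_cmp_unsuffix_spec : Claim_equal_str_cmp_unsuffix := by
  intro str1 str2 _
  unfold Spec_str_cmp_unsuffix str_cmp_unsuffix str_cmp_unsuffix_alt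
  by_cases hg : (PySem.Str.isIn "." str1 && PySem.Str.isIn "." str2) = true
  · simp only [hg, Bool.not_true]
    set u1 := PySem.List.pyGetD (PySem.Chars.splitOn str1.toList ['.']) 0 [] ++ ['.'] ++
      PySem.List.pyGetD (PySem.Chars.splitOn str1.toList ['.']) 1 [] with hu1
    set u2 := PySem.List.pyGetD (PySem.Chars.splitOn str2.toList ['.']) 0 [] ++ ['.'] ++
      PySem.List.pyGetD (PySem.Chars.splitOn str2.toList ['.']) 1 [] with hu2
    by_cases hl : u1.length = u2.length
    · have := pvLoopA_eq u1 u2 hl 0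
      simp only [List.drop_zero] at this
      simp [hl, this]
    · have hne : u1.map pvNorm ≠ u2.map pvNorm := by
        intro hmap
        exact hl (by simpa using congrArg List.length hmap)
      simp [hl, hne]
  · rw [Bool.not_eq_true] at hg
    simp only [hg, Bool.not_false, if_true]
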